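-- pv_equiv track=rewrite | github.com/HliasMpGH/DSA | assignment-2023-1/lance_williams.py | minIn
-- ===== SOURCE A (Python) =====
-- def minIn(dist):
--     ''' Input:  dist, a 2d matrix
--         Output: minD, the minimum element of said matrix
--                 c1, collumn index of the element
--                 c2, row index of the element '''
--     min_row = []
--     for i in dist :
--         min_row.append(min(i))
--     minD = min(min_row)
--     c1,c2 = -1,-1
--     for i in range(len(dist)) :
--         for j in range(len(dist[i])) :
--             if minD == dist[i][j] and c1 == -1: # save the first occurance of min
--                 c1 = j
--                 c2 = i
--     return minD,c1,c2
-- ===== SOURCE B (Python) =====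
-- def minIn(dist):
--     ''' Re-implementation: per-row minima, then index-based first-occurrence
--         lookup instead of the nested flag-guarded scan. '''
--     min_row = [min(row) for row in dist]
--     minD = min(min_row)
--     c2 = min_row.index(minD)
--     c1 = dist[c2].index(minD)
--     return minD, c1, c2
-- ===== Notes on version B (the rewrite author's own statement) =====
-- stated objective: simpler
-- what changed: Replaces A's nested flag-guarded index scan with two first-occurrence .index lookups: the first row whose minimum equals the global minimum, then the column of the minimum in that row.
import Mathlib
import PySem

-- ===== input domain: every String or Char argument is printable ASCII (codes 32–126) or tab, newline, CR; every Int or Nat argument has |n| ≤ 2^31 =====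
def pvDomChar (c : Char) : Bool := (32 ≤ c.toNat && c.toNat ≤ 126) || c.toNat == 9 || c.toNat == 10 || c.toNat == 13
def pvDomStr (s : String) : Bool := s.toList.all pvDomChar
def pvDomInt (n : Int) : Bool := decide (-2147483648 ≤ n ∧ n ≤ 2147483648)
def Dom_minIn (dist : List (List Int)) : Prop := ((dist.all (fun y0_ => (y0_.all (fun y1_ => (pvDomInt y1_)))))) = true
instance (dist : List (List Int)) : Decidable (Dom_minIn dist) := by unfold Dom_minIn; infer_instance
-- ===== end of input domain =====

-- B replaces A's nested first-occurrence scan with two .index lookups on the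
-- per-row-minima list (objective: simpler).

-- ===== PORT A =====
def minIn (dist : List (List Int)) : Int × Int × Int :=
  let min_row := dist.foldl (fun acc i => acc ++ [(PySem.List.min? i (fun x => x)).getD 0]) []
  let minD := (PySem.List.min? min_row (fun x => x)).getD 0
  let cs := (PySem.List.pyRange 0 (dist.length : Int) 1).foldl (fun (s : Int × Int) i =>
      (PySem.List.pyRange 0 ((PySem.List.pyGetD dist i []).length : Int) 1).foldl
        (fun (s2 : Int × Int) j =>
          if minD == PySem.List.pyGetD (PySem.List.pyGetD dist i []) j 0 && s2.1 == -1
          then (j, i) else s2) s)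
    ((-1 : Int), (-1 : Int))
  (minD, cs.1, cs.2)

-- ===== PORT B =====
def minIn_alt (dist : List (List Int)) : Int × Int × Int :=
  let min_row := dist.map (fun row => (PySem.List.min? row (fun x => x)).getD 0)
  let minD := (PySem.List.min? min_row (fun x => x)).getD 0
  let c2 : Int := ((PySem.List.index? min_row minD).getD 0 : Nat)
  let c1 : Int := ((PySem.List.index? (PySem.List.pyGetD dist c2 []) minD).getD 0 : Nat)
  (minD, c1, c2)

-- ===== PRECONDITION & SPEC =====
-- Pre_ excludes exactly the inputs on which Python A raises ValueError:
-- the empty matrix and matrices with an empty row (min() of an empty list).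
def Pre_minIn (dist : List (List Int)) : Prop := dist ≠ [] ∧ ∀ row ∈ dist, row ≠ []
instance (dist : List (List Int)) : Decidable (Pre_minIn dist) := by unfold Pre_minIn; infer_instance
def pvWitness_minIn : List (List Int) := [[3, 1], [2, 1]]
def Spec_minIn (dist : List (List Int)) (out : Int × Int × Int) : Prop := out = minIn_alt dist
instance (dist : List (List Int)) (out : Int × Int × Int) : Decidable (Spec_minIn dist out) := by unfold Spec_minIn; infer_instance

-- ===== CLAIM (what is proved, stated in full; the proofs are below) =====
def Claim_equal_minIn : Prop := ∀ (dist : List (List Int)), Dom_minIn dist → Pre_minIn dist → Spec_minIn dist (minIn dist)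

-- ===== LEMMAS AND PROOFS =====

-- A's inner-loop body, with the (index, value) pair from enumerate
def pvStep (minD i : Int) (s : Int × Int) (p : Int × Int) : Int × Int :=
  if minD == p.2 && s.1 == -1 then (p.1, i) else s

def pvInner (minD i : Int) (row : List Int) (start : Int) (s : Int × Int) : Int × Int :=
  (PySem.List.enumerate row start).foldl (pvStep minD i) s

def pvOuter (minD : Int) (rows : List (List Int)) (start : Int) (s : Int × Int) : Int × Int :=
  (PySem.List.enumerate rows start).foldl (fun s p => pvInner minD p.1 p.2 0 s) s

theorem pvInner_flag (minD i : Int) (row : List Int) (start : Int) (s : Int × Int)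
    (h : s.1 ≠ -1) : pvInner minD i row start s = s := by
  induction row generalizing start with
  | nil => simp [pvInner, PySem.List.enumerate]
  | cons x t ih =>
      simp only [pvInner, PySem.List.enumerate_cons, List.foldl_cons] at *
      rw [show pvStep minD i s (start, x) = s by simp [pvStep, h]]
      exact ih (start + 1)

theorem pvInner_notmem (minD i : Int) (row : List Int) (start : Int) (s : Int × Int)
    (h : minD ∉ row) : pvInner minD i row start s = s := by
  induction row generalizing start with
  | nil => simp [pvInner, PySem.List.enumerate]
  | cons x t ih =>
      simp only [List.mem_cons, not_or] at h
      simp only [pvInner, PySem.List.enumerate_cons, List.foldl_cons] at *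
      rw [show pvStep minD i s (start, x) = s by simp [pvStep, h.1]]
      exact ih (start + 1) h.2

theorem pvInner_hit (minD i : Int) (row : List Int) (start : Int) (s : Int × Int)
    (hstart : 0 ≤ start) (hs : s.1 = -1) {j : Nat}
    (hj : PySem.List.index? row minD = some j) :
    pvInner minD i row start s = (start + (j : Int), i) := by
  induction row generalizing start j with
  | nil => simp [PySem.List.index?] at hj
  | cons x t ih =>
      by_cases hx : x = minD
      · rw [hx, PySem.List.index?_cons_self] at hj
        injection hj with hj
        simp only [pvInner, PySem.List.enumerate_cons, List.foldl_cons]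
        rw [show pvStep minD i s (start, x) = (start, i) by simp [pvStep, hs, hx]]
        have := pvInner_flag minD i t (start + 1) (start, i) (by simp; omega)
        simp only [pvInner] at this
        rw [this, ← hj]; simp
      · rw [PySem.List.index?_cons_of_ne t hx] at hj
        rcases Option.map_eq_some_iff.mp hj with ⟨j', hj', rfl⟩
        simp only [pvInner, PySem.List.enumerate_cons, List.foldl_cons]
        rw [show pvStep minD i s (start, x) = s by simp [pvStep, Ne.symm hx]]
        have := ih (start + 1) (by omega) hj'
        simp only [pvInner] at this
        rw [this]; push_cast; ring_nf

theorem pvOuter_skip (minD : Int) (rows : List (List Int)) (start : Int) (s : Int × Int)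
    (h : ∀ row ∈ rows, minD ∉ row) : pvOuter minD rows start s = s := by
  induction rows generalizing start with
  | nil => simp [pvOuter, PySem.List.enumerate]
  | cons r t ih =>
      simp only [pvOuter, PySem.List.enumerate_cons, List.foldl_cons] at *
      rw [pvInner_notmem minD start r 0 s (h r (List.mem_cons_self))]
      exact ih (start + 1) (fun row hr => h row (List.mem_cons_of_mem _ hr))

theorem pvOuter_flag (minD : Int) (rows : List (List Int)) (start : Int) (s : Int × Int)
    (h : s.1 ≠ -1) : pvOuter minD rows start s = s := by
  induction rows generalizing start with
  | nil => simp [pvOuter, PySem.List.enumerate]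
  | cons r t ih =>
      simp only [pvOuter, PySem.List.enumerate_cons, List.foldl_cons] at *
      rw [pvInner_flag minD start r 0 s h]
      exact ih (start + 1)

theorem pvOuter_hit (minD : Int) (pre : List (List Int)) (r : List Int)
    (suf : List (List Int)) (start : Int)
    (hpre : ∀ row ∈ pre, minD ∉ row) {j : Nat}
    (hj : PySem.List.index? r minD = some j) :
    pvOuter minD (pre ++ r :: suf) start (-1, -1) = ((j : Int), start + pre.length) := by
  simp only [pvOuter, PySem.List.enumerate_append, List.foldl_append]
  have h1 := pvOuter_skip minD pre start (-1, -1) hpre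
  simp only [pvOuter] at h1
  rw [h1]
  simp only [PySem.List.enumerate_cons, List.foldl_cons]
  rw [pvInner_hit minD (start + pre.length) r 0 (-1, -1) le_rfl rfl hj]
  have h3 := pvOuter_flag minD suf (start + pre.length + 1) ((0 : Int) + j, start + pre.length)
      (by simp)
  simp only [pvOuter] at h3
  rw [h3]; simp

-- A's nested pyRange fold is pvOuter
theorem pvA_fold_eq_outer (minD : Int) (dist : List (List Int)) :
    ((PySem.List.pyRange 0 (dist.length : Int) 1).foldl (fun (s : Int × Int) i =>
      (PySem.List.pyRange 0 ((PySem.List.pyGetD dist i []).length : Int) 1).foldl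
        (fun (s2 : Int × Int) j =>
          if minD == PySem.List.pyGetD (PySem.List.pyGetD dist i []) j 0 && s2.1 == -1
          then (j, i) else s2) s)
      ((-1 : Int), (-1 : Int)))
    = pvOuter minD dist 0 (-1, -1) := by
  have hfun : ∀ (s : Int × Int) (i : Int),
      (PySem.List.pyRange 0 ((PySem.List.pyGetD dist i []).length : Int) 1).foldl
        (fun (s2 : Int × Int) j =>
          if minD == PySem.List.pyGetD (PySem.List.pyGetD dist i []) j 0 && s2.1 == -1
          then (j, i) else s2) s
      = pvInner minD i (PySem.List.pyGetD dist i []) 0 s := by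
    intro s i
    simp only [pvInner, PySem.List.enumerate_eq_map_pyRange _ (0 : Int), List.foldl_map,
      pvStep, PySem.List.len]
  simp only [hfun, pvOuter, PySem.List.enumerate_eq_map_pyRange _ ([] : List Int),
    List.foldl_map, PySem.List.len]

theorem minIn_spec : Claim_equal_minIn := by
  intro dist _ hpre
  obtain ⟨hne, hrows⟩ := hpre
  unfold Spec_minIn minIn minIn_alt
  simp only [PySem.List.foldl_append_singleton_eq_map, List.nil_append]
  set rowMin : List Int → Int := fun row => (PySem.List.min? row (fun x => x)).getD 0 with hrowMin
  set M := dist.map rowMin with hM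
  -- the global minimum
  have hMne : M ≠ [] := by simpa [hM] using hne
  obtain ⟨m, hm⟩ : ∃ m, PySem.List.min? M (fun x => x) = some m := by
    cases h : PySem.List.min? M (fun x => x) with
    | none => exact absurd ((PySem.List.min?_eq_none_iff _ _).mp h) hMne
    | some m => exact ⟨m, rfl⟩
  have hmD : (PySem.List.min? M (fun x => x)).getD 0 = m := by rw [hm]; rfl
  have hmmem : m ∈ M := PySem.List.min?_mem hm
  have hmin : ∀ y ∈ M, m ≤ y := PySem.List.min?_isMin hm
  -- first index of m in M
  obtain ⟨k, hk⟩ : ∃ k, PySem.List.index? M m = some k := by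
    cases h : PySem.List.index? M m with
    | none => exact absurd ((PySem.List.index?_eq_none_iff M m).mp h) (by simpa using hmmem)
    | some k => exact ⟨k, rfl⟩
  obtain ⟨preM, sufM, hMsplit, hlenM, hnotinM⟩ := (PySem.List.index?_eq_some_iff M m k).mp hk
  -- split dist accordingly
  obtain ⟨l₁, l₂, hdist, hmap1, hmap2⟩ := List.map_eq_append_iff.mp (hM ▸ hMsplit)
  obtain ⟨r, suf, hl₂, hrm, hmapsuf⟩ := List.map_eq_cons_iff.mp hmap2
  subst hl₂
  have hlen1 : l₁.length = k := by rw [← hlenM, ← hmap1, List.length_map]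
  -- rows before r do not contain m
  have hpre' : ∀ row ∈ l₁, m ∉ row := by
    intro row hrowmem hcon
    have hrowdist : row ∈ dist := by rw [hdist]; exact List.mem_append_left _ hrowmem
    obtain ⟨mr, hmr⟩ : ∃ mr, PySem.List.min? row (fun x => x) = some mr := by
      cases h : PySem.List.min? row (fun x => x) with
      | none => exact absurd ((PySem.List.min?_eq_none_iff _ _).mp h) (hrows row hrowdist)
      | some mr => exact ⟨mr, rfl⟩
    have h1 : mr ≤ m := PySem.List.min?_isMin hmr m hcon
    have h2 : m ≤ mr := hmin _ (by
      rw [hM]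
      exact List.mem_map.mpr ⟨row, hrowdist, by simp [hrowMin, hmr]⟩)
    have : mr = m := le_antisymm h1 h2
    exact hnotinM (by
      rw [← hmap1, ← this]
      exact List.mem_map.mpr ⟨row, hrowmem, by simp [hrowMin, hmr]⟩)
  -- m is in r, at its first index j
  have hrdist : r ∈ dist := by rw [hdist]; exact List.mem_append_right _ List.mem_cons_self
  obtain ⟨mr, hmr⟩ : ∃ mr, PySem.List.min? r (fun x => x) = some mr := by
    cases h : PySem.List.min? r (fun x => x) with
    | none => exact absurd ((PySem.List.min?_eq_none_iff _ _).mp h) (hrows r hrdist)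
    | some mr => exact ⟨mr, rfl⟩
  have hmrm : mr = m := by rw [← hrm]; simp [hrowMin, hmr]
  have hmr_mem : m ∈ r := hmrm ▸ PySem.List.min?_mem hmr
  obtain ⟨j, hj⟩ : ∃ j, PySem.List.index? r m = some j := by
    cases h : PySem.List.index? r m with
    | none => exact absurd ((PySem.List.index?_eq_none_iff r m).mp h) (by simpa using hmr_mem)
    | some j => exact ⟨j, rfl⟩
  -- evaluate A's loop
  rw [hmD, pvA_fold_eq_outer]
  rw [show dist = l₁ ++ r :: suf from hdist]
  rw [pvOuter_hit m l₁ r suf 0 hpre' hj]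
  -- evaluate B
  have hgetk : PySem.List.pyGetD (l₁ ++ r :: suf) ((k : Nat) : Int) [] = r := by
    rw [PySem.List.pyGetD_natCast]
    rw [← hlen1]
    simp [List.getD]
  rw [hk]
  simp only [Option.getD_some]
  rw [hgetk, hj]
  simp [hlen1]
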